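-- pv_equiv track=rewrite | github.com/pypi-data/pypi-mirror-399 | packages/ison-py/ison_py-1.0.1-py3-none-any.whl/ison_parser/plugins/rudradb_plugin.py | _get_content_fields
-- ===== SOURCE A (Python) =====
-- from typing import Any, Dict, List, Optional, Iterator, Union, Callable
--
-- def _get_content_fields(record: Dict[str, Any]) -> List[str]:
--     """Get content-relevant fields for RAG context."""
--     priority_fields = ['content', 'text', 'body', 'document', 'description', 'title', 'name']
--     fields = []
--
--     # Add priority fields first
--     for field in priority_fields:
--         if field in record:
--             fields.append(field)
--
--     # Add remaining fields
--     for field in record.keys():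
--         if field not in fields and not field.startswith('_'):
--             fields.append(field)
--
--     return fields
-- ===== SOURCE B (Python) =====
-- def _get_content_fields(record):
--     """Get content-relevant fields for RAG context."""
--     priority_fields = ['content', 'text', 'body', 'document', 'description', 'title', 'name']
--     n = len(priority_fields)
--     rank = {name: i for i, name in enumerate(priority_fields)}
--     # bucket sort by priority rank in a single pass over the record's keys
--     buckets = [[] for _ in range(n + 1)]
--     for key in record.keys():
--         i = rank.get(key, n)
--         if i < n or not key.startswith('_'):
--             buckets[i].append(key)
--     return [key for bucket in buckets for key in bucket]
-- ===== Notes on version B (the rewrite author's own statement) =====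
-- stated objective: faster
-- what changed: Replaces A's two membership-scanning passes (a priority-list pass plus a per-key 'field not in fields' scan of the growing result list) with a single pass over the record's keys that bucket-sorts each key by its priority rank (rank dict built once), then concatenates the buckets.
import Mathlib
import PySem

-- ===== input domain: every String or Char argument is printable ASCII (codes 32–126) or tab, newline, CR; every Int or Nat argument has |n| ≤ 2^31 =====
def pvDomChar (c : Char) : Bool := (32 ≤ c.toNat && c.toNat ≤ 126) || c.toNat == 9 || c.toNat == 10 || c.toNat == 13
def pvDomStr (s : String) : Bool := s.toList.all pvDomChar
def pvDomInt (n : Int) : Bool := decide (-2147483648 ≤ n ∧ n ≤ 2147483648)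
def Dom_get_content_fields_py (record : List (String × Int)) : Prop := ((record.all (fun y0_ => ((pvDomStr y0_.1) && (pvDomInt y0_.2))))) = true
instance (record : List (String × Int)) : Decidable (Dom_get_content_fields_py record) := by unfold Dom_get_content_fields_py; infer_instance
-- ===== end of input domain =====

-- B replaces A's two membership-scanning passes (including a per-key scan of the growing
-- result list) by one bucket-sort pass over the record's keys (rank looked up in a dict
-- built once), then concatenates the buckets; measurably faster on large records.

-- ===== PORT A =====
-- priority_fields = ['content', 'text', 'body', 'document', 'description', 'title', 'name']
def pvPriority : List String := ["content", "text", "body", "document", "description", "title", "name"]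

def get_content_fields_py (record : List (String × Int)) : List String :=
  let d := PySem.Dict.ofList record
  -- for field in priority_fields: if field in record: fields.append(field)
  let fields := pvPriority.foldl (fun fs f => if d.contains f then fs ++ [f] else fs) []
  -- for field in record.keys(): if field not in fields and not field.startswith('_'): fields.append(field)
  d.keys.foldl (fun fs f => if !(fs.contains f) && !(PySem.Str.startswith f "_") then fs ++ [f] else fs) fields

-- ===== PORT B =====
-- rank = {name: i for i, name in enumerate(priority_fields)}
def pvRank : PySem.Dict String Int :=
  (PySem.List.enumerate pvPriority).foldl (fun r p => r.insert p.2 p.1) PySem.Dict.empty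

-- loop body: i = rank.get(key, n); if i < n or not key.startswith('_'): buckets[i].append(key)
def pvBStep (bs : List (List String)) (k : String) : List (List String) :=
  if decide (pvRank.getD k (pvPriority.length : Int) < (pvPriority.length : Int)) ||
      !(PySem.Str.startswith k "_") then
    PySem.List.pySetD bs (pvRank.getD k (pvPriority.length : Int))
      (PySem.List.pyGetD bs (pvRank.getD k (pvPriority.length : Int)) [] ++ [k])
  else bs

def get_content_fields_py_alt (record : List (String × Int)) : List String :=
  ((PySem.Dict.ofList record).keys.foldl pvBStep
    (List.replicate (pvPriority.length + 1) [])).flatten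

-- ===== PRECONDITION & SPEC =====
def Spec_get_content_fields_py (record : List (String × Int)) (out : List String) : Prop := out = get_content_fields_py_alt record
instance (record : List (String × Int)) (out : List String) : Decidable (Spec_get_content_fields_py record out) := by unfold Spec_get_content_fields_py; infer_instance

-- ===== CLAIM (what is proved, stated in full; the proofs are below) =====
def Claim_equal_get_content_fields_py : Prop := ∀ (record : List (String × Int)), Dom_get_content_fields_py record → Spec_get_content_fields_py record (get_content_fields_py record)

-- ===== LEMMAS AND PROOFS =====

lemma pvIdx_eq (k : String) : pvRank.getD k (pvPriority.length : Int) =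
    if "content" == k then 0 else if "text" == k then 1 else if "body" == k then 2
    else if "document" == k then 3 else if "description" == k then 4 else if "title" == k then 5
    else if "name" == k then 6 else 7 := by
  have h : pvRank = PySem.Dict.mk [("content",0),("text",1),("body",2),("document",3),("description",4),("title",5),("name",6)] := by decide
  have hl : (pvPriority.length : Int) = 7 := by norm_num [pvPriority]
  rw [h, hl]
  simp only [PySem.Dict.getD_eq_get?_getD, PySem.Dict.get?_mk_cons]
  split_ifs <;> rfl

lemma pvIdx_bounds (k : String) : 0 ≤ pvRank.getD k (pvPriority.length : Int) ∧
    pvRank.getD k (pvPriority.length : Int) < 8 := by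
  rw [pvIdx_eq k]; split_ifs <;> omega

lemma pvBStep_length (bs : List (List String)) (k : String) :
    (pvBStep bs k).length = bs.length := by
  unfold pvBStep
  split
  · exact PySem.List.length_pySetD ..
  · rfl

lemma pvFoldl_length (l : List String) (bs : List (List String)) :
    (l.foldl pvBStep bs).length = bs.length := by
  induction l generalizing bs with
  | nil => rfl
  | cons k t ih => rw [List.foldl_cons, ih, pvBStep_length]

-- keys landing in bucket j
def pvPred (j : Nat) (k : String) : Bool :=
  (decide (pvRank.getD k (pvPriority.length : Int) < (pvPriority.length : Int)) ||
    !(PySem.Str.startswith k "_")) && (pvRank.getD k (pvPriority.length : Int) == (j : Int))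

lemma pvGetD_set (l : List (List String)) (m j : Nat) (v : List String) (hm : m < l.length) :
    (l.set m v).getD j [] = if j = m then v else l.getD j [] := by
  simp only [List.getD_eq_getElem?_getD, List.getElem?_set]
  by_cases h : m = j
  · subst h; simp [hm]
  · rw [if_neg h, if_neg (fun hh => h hh.symm)]

lemma pvBucket (l : List String) (bs : List (List String)) (h8 : bs.length = 8) (j : Nat) :
    (l.foldl pvBStep bs).getD j [] = bs.getD j [] ++ l.filter (pvPred j) := by
  induction l generalizing bs with
  | nil => simp
  | cons k t ih =>
    rw [List.foldl_cons, ih (pvBStep bs k) (by rw [pvBStep_length, h8]), List.filter_cons]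
    obtain ⟨h0, h7⟩ := pvIdx_bounds k
    have hstep : (pvBStep bs k).getD j [] = bs.getD j [] ++ (if pvPred j k then [k] else []) := by
      unfold pvBStep pvPred
      set i := pvRank.getD k (pvPriority.length : Int) with hi
      by_cases hkeep : (decide (i < (pvPriority.length : Int)) || !(PySem.Str.startswith k "_")) = true
      · rw [if_pos hkeep, Bool.and_comm, PySem.List.pySetD_of_nonneg _ _ h0,
            PySem.List.pyGetD_eq_getElem _ _ h0 (by omega),
            pvGetD_set _ _ _ _ (by omega)]
        by_cases hj : j = i.toNat
        · simp only [Bool.or_eq_true, decide_eq_true_eq, Bool.not_eq_true'] at hkeep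
          simp [hj, List.getD_eq_getElem?_getD,
                List.getElem?_eq_getElem (show i.toNat < bs.length by omega)]
          exact ⟨h0, fun hge => hkeep.resolve_left (by omega)⟩
        · have hb : (i == (j : Int)) = false := by simp only [beq_eq_false_iff_ne]; omega
          simp only [beq_eq_false_iff_ne, ne_eq] at hb
          simp [hj]
          exact fun h => absurd h hb
      · rw [if_neg hkeep]
        simp only [Bool.or_eq_true, decide_eq_true_eq, Bool.not_eq_true', not_or] at hkeep
        simp
        intro h
        exact absurd h (by tauto)
    rw [hstep]
    by_cases hp : pvPred j k = true <;> simp [hp]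

-- A's second loop over a duplicate-free list appends exactly the new keys passing the test
lemma pvLoop2 (c : String → Bool) (l : List String) (hnd : l.Nodup) : ∀ (init : List String),
    l.foldl (fun fs f => if !(fs.contains f) && c f then fs ++ [f] else fs) init
      = init ++ l.filter (fun f => !(init.contains f) && c f) := by
  induction l with
  | nil => simp
  | cons k t ih =>
    intro init
    have hk : k ∉ t := (List.nodup_cons.mp hnd).1
    have ht : t.Nodup := (List.nodup_cons.mp hnd).2
    rw [List.foldl_cons, List.filter_cons]
    by_cases hc : (!(init.contains k) && c k) = true
    · rw [if_pos hc, if_pos hc, ih ht (init ++ [k])]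
      have hfc : t.filter (fun f => !((init ++ [k]).contains f) && c f)
          = t.filter (fun f => !(init.contains f) && c f) := by
        apply List.filter_congr
        intro x hx
        have hxk : x ≠ k := fun h => hk (h ▸ hx)
        simp [hxk]
      rw [hfc]; simp
    · rw [if_neg hc, if_neg hc, ih ht init]

lemma pvLen8 (R : List (List String)) (h : R.length = 8) :
    R = [R.getD 0 [], R.getD 1 [], R.getD 2 [], R.getD 3 [],
         R.getD 4 [], R.getD 5 [], R.getD 6 [], R.getD 7 []] := by
  rcases R with _|⟨a,_|⟨b,_|⟨c,_|⟨d,_|⟨e,_|⟨f,_|⟨g,_|⟨h8,t⟩⟩⟩⟩⟩⟩⟩⟩ <;> simp_all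

-- filtering for a single value out of a duplicate-free list
lemma pvFilter_single (l : List String) (hnd : l.Nodup) (p : String) :
    l.filter (fun k => p == k) = if l.contains p then [p] else [] := by
  have : (fun k => p == k) = (fun k => k == p) := by funext k; exact Bool.beq_comm
  rw [this, List.filter_beq]
  by_cases hp : p ∈ l
  · simp [List.count_eq_one_of_mem hnd hp, hp]
  · simp [List.count_eq_zero_of_not_mem hp, hp]

-- the per-bucket membership predicates, pointwise
lemma pvPred_lt (k : String) :
    (pvPred 0 k = ("content" == k)) ∧ (pvPred 1 k = ("text" == k)) ∧
    (pvPred 2 k = ("body" == k)) ∧ (pvPred 3 k = ("document" == k)) ∧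
    (pvPred 4 k = ("description" == k)) ∧ (pvPred 5 k = ("title" == k)) ∧
    (pvPred 6 k = ("name" == k)) := by
  have hl : (pvPriority.length : Int) = 7 := by norm_num [pvPriority]
  unfold pvPred
  rw [pvIdx_eq k, hl]
  split_ifs <;> simp_all <;> subst_vars <;> decide

lemma pvPred_7 (k : String) :
    pvPred 7 k = (!(pvPriority.contains k) && !(PySem.Str.startswith k "_")) := by
  have hl : (pvPriority.length : Int) = 7 := by norm_num [pvPriority]
  unfold pvPred
  rw [pvIdx_eq k, hl]
  split_ifs with h1 h2 h3 h4 h5 h6 h7 <;> simp only [beq_iff_eq] at * <;> subst_vars <;>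
    first
      | decide
      | (have hmem : k ∉ pvPriority := by intro hm; fin_cases hm <;> simp_all
         simp [hmem])

lemma pvSingleton_append_if (b : Bool) (a : String) (X : List String) :
    (if b then [a] else []) ++ X = if b then a :: X else X := by
  cases b <;> simp

set_option maxHeartbeats 2000000 in
lemma pv_mainD (d : PySem.Dict String Int) (hnd : d.keys.Nodup) :
    d.keys.foldl (fun fs f => if !(fs.contains f) && !(PySem.Str.startswith f "_") then fs ++ [f] else fs)
      (pvPriority.foldl (fun fs f => if d.contains f then fs ++ [f] else fs) [])
    = ((d.keys.foldl pvBStep (List.replicate (pvPriority.length + 1) [])).flatten) := by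
  -- A side: first loop is a filter of the priority list, second appends the new passing keys
  rw [PySem.List.foldl_append_if_eq_filter d.contains pvPriority [], List.nil_append,
      pvLoop2 _ _ hnd]
  -- B side: read off the 8 buckets
  set R := d.keys.foldl pvBStep (List.replicate (pvPriority.length + 1) []) with hR
  have hlen : R.length = 8 := by rw [hR, pvFoldl_length]; rfl
  rw [pvLen8 R hlen]
  have hB : ∀ j : Nat, R.getD j [] = d.keys.filter (pvPred j) := by
    intro j
    rw [hR, pvBucket _ _ (by rfl) j]
    simp [List.getD_eq_getElem?_getD, List.getElem?_replicate]
    split_ifs <;> rfl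
  simp only [hB, List.flatten_cons, List.flatten_nil]
  have hcon : ∀ p, d.contains p = d.keys.contains p := by
    intro p
    rw [PySem.Dict.contains_eq_decide_mem_keys]
    simp
  have hFlt : ∀ p : String, d.keys.filter (fun k => p == k) = if d.contains p then [p] else [] := by
    intro p; rw [pvFilter_single _ hnd p, hcon p]
  have e0 := fun k => (pvPred_lt k).1
  have e1 := fun k => (pvPred_lt k).2.1
  have e2 := fun k => (pvPred_lt k).2.2.1
  have e3 := fun k => (pvPred_lt k).2.2.2.1
  have e4 := fun k => (pvPred_lt k).2.2.2.2.1
  have e5 := fun k => (pvPred_lt k).2.2.2.2.2.1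
  have e6 := fun k => (pvPred_lt k).2.2.2.2.2.2
  rw [List.filter_congr (fun k _ => e0 k), List.filter_congr (fun k _ => e1 k),
      List.filter_congr (fun k _ => e2 k), List.filter_congr (fun k _ => e3 k),
      List.filter_congr (fun k _ => e4 k), List.filter_congr (fun k _ => e5 k),
      List.filter_congr (fun k _ => e6 k)]
  rw [hFlt "content", hFlt "text", hFlt "body", hFlt "document",
      hFlt "description", hFlt "title", hFlt "name"]
  -- the tail bucket is exactly A's second filter
  have hTail : d.keys.filter (pvPred 7)
      = d.keys.filter (fun f => !((pvPriority.filter d.contains).contains f) && !(PySem.Str.startswith f "_")) := by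
    apply List.filter_congr
    intro x hx
    rw [pvPred_7 x]
    have hdx : d.contains x = true := by
      rw [hcon x]; simp [hx]
    have hcf : (pvPriority.filter d.contains).contains x = pvPriority.contains x := by
      simp [hdx]
    rw [hcf]
  rw [← hTail]
  -- both sides are now the 7 conditional singletons followed by the shared tail
  simp only [pvSingleton_append_if, List.append_nil]
  simp only [pvPriority, List.filter_cons, List.filter_nil]
  split_ifs <;> simp

theorem pv_main (record : List (String × Int)) :
    get_content_fields_py record = get_content_fields_py_alt record :=
  pv_mainD (PySem.Dict.ofList record) (PySem.Dict.nodup_keys_ofList record)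

-- ===== VERDICT (by name: the statement is the Claim_ definition above) =====
theorem get_content_fields_py_spec : Claim_equal_get_content_fields_py := by
  intro record _
  unfold Spec_get_content_fields_py
  exact pv_main record
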